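-- pv_equiv track=rewrite | github.com/Rimmi-K/chkn26 | dpfa/utils/pathway_utils.py | get_merged_pathway_name
-- ===== SOURCE A (Python) =====
-- from typing import List, Dict, Optional
--
-- def get_merged_pathway_name(pathway: str,
--                             merging_dict: Dict[str, List[str]]) -> str:
--     """
--     Get merged name for a single pathway
--     """
--     if not merging_dict:
--         return pathway
--
--     for new_name, old_names in merging_dict.items():
--         if pathway in old_names:
--             return new_name
--
--     return pathway
-- ===== SOURCE B (Python) =====
-- def get_merged_pathway_name(pathway, merging_dict):
--     """Reverse-lookup form: build old_name -> new_name index once, then one lookup."""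
--     reverse = {}
--     for new_name, old_names in merging_dict.items():
--         for old in old_names:
--             reverse.setdefault(old, new_name)
--     return reverse.get(pathway, pathway)
-- ===== Notes on version B (the rewrite author's own statement) =====
-- stated objective: idiomatic
-- what changed: B builds a reverse old-name->new-name dict once (setdefault so the first entry wins) and answers with a single dict lookup, instead of A's per-entry list membership scan.
import Mathlib
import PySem

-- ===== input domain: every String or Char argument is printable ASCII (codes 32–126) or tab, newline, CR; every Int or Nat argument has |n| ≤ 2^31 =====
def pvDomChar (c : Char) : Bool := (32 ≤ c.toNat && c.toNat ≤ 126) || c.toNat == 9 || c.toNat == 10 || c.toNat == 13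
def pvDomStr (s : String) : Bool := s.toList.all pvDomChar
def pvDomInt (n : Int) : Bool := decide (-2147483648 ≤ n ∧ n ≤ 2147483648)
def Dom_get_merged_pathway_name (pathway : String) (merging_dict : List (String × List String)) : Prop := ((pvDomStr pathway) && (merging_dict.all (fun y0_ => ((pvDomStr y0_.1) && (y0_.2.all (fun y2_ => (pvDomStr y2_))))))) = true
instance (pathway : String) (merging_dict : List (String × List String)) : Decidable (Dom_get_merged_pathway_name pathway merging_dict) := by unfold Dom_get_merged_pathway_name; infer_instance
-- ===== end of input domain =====

-- B builds a reverse old->new dict once (setdefault: first entry wins) and does one lookup; idiomatic, same cost.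

-- ===== PORT A =====
-- the 'for new_name, old_names in merging_dict.items(): if pathway in old_names: return new_name' loop
def pvLoopA (pathway : String) : List (String × List String) → String
  | [] => pathway
  | (new_name, old_names) :: rest =>
      if old_names.contains pathway then new_name else pvLoopA pathway rest

def get_merged_pathway_name (pathway : String) (merging_dict : List (String × List String)) : String :=
  if merging_dict = [] then pathway
  else pvLoopA pathway merging_dict

-- ===== PORT B =====
def get_merged_pathway_name_alt (pathway : String) (merging_dict : List (String × List String)) : String :=
  let reverse : PySem.Dict String String :=
    merging_dict.foldl
      (fun d p => p.2.foldl (fun d old => d.setdefault old p.1) d)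
      PySem.Dict.empty
  (reverse.get? pathway).getD pathway

-- ===== PRECONDITION & SPEC =====
def Spec_get_merged_pathway_name (pathway : String) (merging_dict : List (String × List String)) (out : String) : Prop := out = get_merged_pathway_name_alt pathway merging_dict
instance (pathway : String) (merging_dict : List (String × List String)) (out : String) : Decidable (Spec_get_merged_pathway_name pathway merging_dict out) := by unfold Spec_get_merged_pathway_name; infer_instance

-- ===== CLAIM (what is proved, stated in full; the proofs are below) =====
def Claim_equal_get_merged_pathway_name : Prop := ∀ (pathway : String) (merging_dict : List (String × List String)), Dom_get_merged_pathway_name pathway merging_dict → Spec_get_merged_pathway_name pathway merging_dict (get_merged_pathway_name pathway merging_dict)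

-- ===== LEMMAS AND PROOFS =====

-- setdefault only changes the lookup of an absent key
theorem pv_get?_setdefault (d : PySem.Dict String String) (k x : String) (v : String) :
    (d.setdefault k v).get? x = (d.get? x).or (if x = k ∧ d.get? k = none then some v else none) := by
  have h1 : d.contains k = (List.find? (fun p => p.1 == k) d.items).isSome := by
    cases hfk : List.find? (fun p => p.1 == k) d.items with
    | some p =>
        simp only [PySem.Dict.contains, List.any_eq_true, Option.isSome_some]
        have hp := List.find?_some hfk
        exact ⟨p, List.mem_of_find?_eq_some hfk, hp⟩
    | none =>
        simp only [PySem.Dict.contains, Option.isSome_none, List.any_eq_false]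
        intro p hp; simpa using List.find?_eq_none.mp hfk p hp
  by_cases hc : d.contains k = true
  · have hk : d.get? k ≠ none := by
      rw [h1] at hc
      simp only [PySem.Dict.get?]
      cases hfk : List.find? (fun p => p.1 == k) d.items with
      | none => rw [hfk] at hc; simp at hc
      | some p => simp
    simp [PySem.Dict.setdefault, hc, hk]
  · have hk : d.get? k = none := by
      rw [h1] at hc
      simp only [PySem.Dict.get?]
      cases hfk : List.find? (fun p => p.1 == k) d.items with
      | none => simp
      | some p => rw [hfk] at hc; simp at hc
    simp only [PySem.Dict.setdefault, hc, if_false, hk, and_true]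
    simp only [PySem.Dict.get?, List.find?_append]
    cases hfx : List.find? (fun p => p.1 == x) d.items with
    | some w => simp [hfx, Option.or]
    | none =>
        by_cases hxk : x = k
        · subst hxk; simp [hfx, List.find?_cons]
        · simp only [PySem.Dict.get?] at hk
          simp [hfx, List.find?_cons, hxk, Ne.symm hxk]

-- inner fold: all inserts carry the same value n
theorem pv_inner (pathway n : String) (olds : List String) (d : PySem.Dict String String) :
    (olds.foldl (fun d old => d.setdefault old n) d).get? pathway
      = (d.get? pathway).or (if olds.contains pathway then some n else none) := by
  induction olds generalizing d with
  | nil => simp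
  | cons o rest ih =>
      simp only [List.foldl_cons, ih, pv_get?_setdefault]
      by_cases hp : pathway = o
      · subst hp
        cases h : d.get? pathway <;> simp [h, Option.or]
      · simp [hp, List.contains_cons]

-- first match over the whole dict, in iteration order
def pvFirst (pathway : String) : List (String × List String) → Option String
  | [] => none
  | (n, olds) :: rest => if olds.contains pathway then some n else pvFirst pathway rest

theorem pv_outer (pathway : String) (md : List (String × List String)) (d : PySem.Dict String String) :
    (md.foldl (fun d p => p.2.foldl (fun d old => d.setdefault old p.1) d) d).get? pathway
      = (d.get? pathway).or (pvFirst pathway md) := by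
  induction md generalizing d with
  | nil => simp [pvFirst]
  | cons p rest ih =>
      simp only [List.foldl_cons, ih, pv_inner, pvFirst]
      cases d.get? pathway <;> split_ifs <;> simp [Option.or]

theorem pv_loopA_eq (pathway : String) (md : List (String × List String)) :
    pvLoopA pathway md = (pvFirst pathway md).getD pathway := by
  induction md with
  | nil => simp [pvLoopA, pvFirst]
  | cons p rest ih =>
      obtain ⟨n, olds⟩ := p
      simp only [pvLoopA, pvFirst]
      split_ifs <;> simp [ih]

-- ===== VERDICT (by name: the statement is the Claim_ definition above) =====
theorem get_merged_pathway_name_spec : Claim_equal_get_merged_pathway_name := by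
  intro pathway md _
  unfold Spec_get_merged_pathway_name get_merged_pathway_name
  simp only [get_merged_pathway_name_alt, pv_outer, PySem.Dict.get?_empty, Option.or]
  split_ifs with h
  · subst h; simp [pvFirst]
  · exact pv_loopA_eq pathway md
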